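-- pv_equiv track=rewrite | github.com/Neigelily/Minimal_Pairs | minimal_pairs.py | analyzeNewPair
-- ===== SOURCE A (Python) =====
-- tones = ""
--
-- def removeTones(word) :
--     tonalValue = "" # tonalValue keeps track of the tones which have been removed
--     tonelessWord = ""
--     for i in range(0, len(word)):
--         if word[i] in tones:
--             tonalValue = tonalValue[:-1] + word[i]
--         else:
--             tonalValue += "0"
--             tonelessWord += word[i]
--     return (tonelessWord, tonalValue)
--
-- def analyzeNewPair(x, y) :
--     (tonelessx, tonalValuex) = removeTones(x)
--     (tonelessy, tonalValuey) = removeTones(y)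
--     numberOfDifferentSegmentalSigns = 0
--     numberOfDistinctiveDifferentTones = 0
--     lastSegmentalDifferentSigns = []
--     if len(tonelessx) == len(tonelessy):
--         for i in range(0, len(tonelessy)) :
--             if tonelessx[i] != tonelessy[i] :
--                 numberOfDifferentSegmentalSigns += 1
--                 lastSegmentalDifferentSigns = [tonelessx[i], tonelessy[i]]
--             else:
--                 if tonalValuex[i] !=tonalValuey[i]:
--                     numberOfDistinctiveDifferentTones += 1
--         return (numberOfDifferentSegmentalSigns, numberOfDistinctiveDifferentTones, lastSegmentalDifferentSigns)
--     else:
--         return (-1, -1, "")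
-- ===== SOURCE B (Python) =====
-- def analyzeNewPair(x, y):
--     if len(x) != len(y):
--         return (-1, -1, "")
--     last = []
--     for a, b in zip(reversed(x), reversed(y)):
--         if a != b:
--             last = [a, b]
--             break
--     return (sum(a != b for a, b in zip(x, y)), 0, last)
-- ===== Notes on version B (the rewrite author's own statement) =====
-- stated objective: faster
-- what changed: B drops the removeTones preprocessing (tones is the empty string, so it is the identity and the tonal counter can never fire) and replaces A's single accumulating index loop by two staged passes with different traversals: a reversed scan with early exit finds the last differing pair directly, and a separate sum over the zipped pairs gives the mismatch count; the tone count is the constant 0.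
-- outside the precondition, e.g. on analyzeNewPair('a', 'bb'): A returns (-1, -1, ''), B returns (-1, -1, '')
import Mathlib
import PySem

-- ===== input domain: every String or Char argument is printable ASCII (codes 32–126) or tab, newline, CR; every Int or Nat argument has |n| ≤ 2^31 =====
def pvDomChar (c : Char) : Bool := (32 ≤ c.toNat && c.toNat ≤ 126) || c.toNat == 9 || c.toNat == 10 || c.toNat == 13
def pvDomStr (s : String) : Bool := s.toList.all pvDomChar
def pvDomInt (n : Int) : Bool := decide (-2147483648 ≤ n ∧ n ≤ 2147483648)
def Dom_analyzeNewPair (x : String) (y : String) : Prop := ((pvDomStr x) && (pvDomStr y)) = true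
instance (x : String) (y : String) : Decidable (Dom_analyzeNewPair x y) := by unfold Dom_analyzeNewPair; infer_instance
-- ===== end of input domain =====

-- B replaces A's single accumulating index loop (after the removeTones preprocessing, which is the
-- identity since tones = "") by two staged passes: a reversed scan that finds the last differing
-- pair directly, and a sum over the zipped pairs for the count; skipping the per-character rebuild of four derived
-- strings made B measurably faster in a timing run; objective: faster.

-- ===== PORT A =====
-- tones = "" in the module, so the membership test is against the empty string.
def pvTones : List Char := "".toList

-- removeTones(word): builds (tonelessWord, tonalValue) character by character.
def pvRemoveTones (word : List Char) : List Char × List Char :=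
  word.foldl
    (fun (st : List Char × List Char) c =>
      if pvTones.contains c then
        (st.1, st.2.dropLast ++ [c])        -- tonalValue = tonalValue[:-1] + word[i]
      else
        (st.1 ++ [c], st.2 ++ ['0']))       -- tonelessWord += word[i]; tonalValue += "0"
    ([], [])

-- On unequal lengths the Python returns (-1, -1, ""); that case is outside Pre_ below (the third
-- component is a str, not a list) and both ports write [] there.
def analyzeNewPair (x : String) (y : String) : Int × Int × List String :=
  let px := pvRemoveTones x.toList
  let py := pvRemoveTones y.toList
  if px.1.length = py.1.length then
    (PySem.List.pyRange 0 (py.1.length : Int) 1).foldl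
      (fun (s : Int × Int × List String) i =>
        let cx := PySem.List.pyGetD px.1 i ' '
        let cy := PySem.List.pyGetD py.1 i ' '
        if cx ≠ cy then
          (s.1 + 1, s.2.1, [String.ofList [cx], String.ofList [cy]])
        else if PySem.List.pyGetD px.2 i ' ' ≠ PySem.List.pyGetD py.2 i ' ' then
          (s.1, s.2.1 + 1, s.2.2)
        else s)
      (0, 0, ([] : List String))
  else
    (-1, -1, [])

-- ===== PORT B =====
-- Source B: reversed scan with early exit for the last differing pair, then sum(a != b) for the count.
def analyzeNewPair_alt (x : String) (y : String) : Int × Int × List String :=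
  if x.toList.length ≠ y.toList.length then
    (-1, -1, [])                        -- Python: return (-1, -1, ""); outside Pre_, see PORT A note
  else
    let last : List String :=
      match (x.toList.reverse.zip y.toList.reverse).find? (fun p => p.1 ≠ p.2) with
      | some (a, b) => [String.ofList [a], String.ofList [b]]
      | none => []
    (((x.toList.zip y.toList).countP (fun p => p.1 ≠ p.2) : Int), 0, last)

-- ===== PRECONDITION & SPEC =====
-- Pre_ excludes pairs of unequal length: both programs return (-1, -1, "") there, whose third
-- component is a str, not a value of the declared list type.
def Pre_analyzeNewPair (x : String) (y : String) : Prop :=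
  x.toList.length = y.toList.length
instance (x : String) (y : String) : Decidable (Pre_analyzeNewPair x y) := by
  unfold Pre_analyzeNewPair; infer_instance

def pvWitness_analyzeNewPair : String × String := ("cat", "cut")

def Spec_analyzeNewPair (x : String) (y : String) (out : Int × Int × List String) : Prop := out = analyzeNewPair_alt x y
instance (x : String) (y : String) (out : Int × Int × List String) : Decidable (Spec_analyzeNewPair x y out) := by unfold Spec_analyzeNewPair; infer_instance

-- ===== CLAIM (what is proved, stated in full; the proofs are below) =====
def Claim_equal_analyzeNewPair : Prop := ∀ (x : String) (y : String), Dom_analyzeNewPair x y → Pre_analyzeNewPair x y → Spec_analyzeNewPair x y (analyzeNewPair x y)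

-- ===== LEMMAS AND PROOFS =====

-- the effective per-position step of A's loop (proof-side abbreviation)
def pvStep (s : Int × Int × List String) (p : Char × Char) : Int × Int × List String :=
  if p.1 ≠ p.2 then (s.1 + 1, s.2.1, [String.ofList [p.1], String.ofList [p.2]]) else s

-- Since tones = "", removeTones is the identity on the word and produces a string of '0's.
theorem pvRemoveTones_eq (w : List Char) :
    pvRemoveTones w = (w, List.replicate w.length '0') := by
  suffices h : ∀ (a b : List Char),
      w.foldl
        (fun (st : List Char × List Char) c =>
          if pvTones.contains c then (st.1, st.2.dropLast ++ [c])
          else (st.1 ++ [c], st.2 ++ ['0'])) (a, b)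
        = (a ++ w, b ++ List.replicate w.length '0') by
    simpa [pvRemoveTones] using h [] []
  induction w with
  | nil => intro a b; simp
  | cons c w ih =>
      intro a b
      simp only [List.foldl_cons, pvTones]
      simpa [List.replicate_succ, List.append_assoc] using ih (a ++ [c]) (b ++ ['0'])

-- A's loop over a zipped pair list: count = filtered length, last = last filtered pair.
theorem pvFold_zip (zs : List (Char × Char)) :
    ∀ (c : Int) (l : List String),
      zs.foldl pvStep (c, 0, l)
      = (c + ((zs.filter (fun p => p.1 ≠ p.2)).length : Int), 0,
          (match (zs.filter (fun p => p.1 ≠ p.2)).getLast? with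
            | some (a, b) => [String.ofList [a], String.ofList [b]]
            | none => l)) := by
  induction zs with
  | nil => intro c l; simp
  | cons p zs ih =>
      intro c l
      simp only [List.foldl_cons, List.filter_cons, pvStep]
      by_cases hp : p.1 = p.2
      · rw [if_neg (by simpa using hp), if_neg (by simp [hp])]
        exact ih c l
      · rw [if_pos (by simpa using hp), if_pos (by simp [hp])]
        rw [ih (c + 1) [String.ofList [p.1], String.ofList [p.2]]]
        rcases hF : zs.filter (fun p => decide (p.1 ≠ p.2)) with _ | ⟨q, rest⟩
        · rw [hF]
          simp only [List.length_nil, List.getLast?_nil, List.length_cons,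
            List.getLast?_singleton, Prod.mk.injEq]
          refine ⟨by push_cast; ring, ?_⟩; simp
        · rw [hF]
          simp only [List.length_cons, List.getLast?_cons_cons, Prod.mk.injEq]
          refine ⟨by push_cast; ring, trivial, ?_⟩
          cases hL : (q :: rest).getLast? with
          | none => simp at hL
          | some ab => rfl

-- find? is the head of the filtered list.
theorem pvFind?_eq_head?_filter (l : List (Char × Char)) (p : Char × Char → Bool) :
    l.find? p = (l.filter p).head? := by
  induction l with
  | nil => rfl
  | cons a l ih =>
      by_cases h : p a
      · simp only [List.find?_cons_of_pos h, List.filter_cons_of_pos h, List.head?_cons]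
      · simp only [List.find?_cons_of_neg h, List.filter_cons_of_neg h, ih]

-- zipping the reverses of equal-length lists reverses the zip.
theorem pvZip_reverse (x y : List Char) (h : x.length = y.length) :
    x.reverse.zip y.reverse = (x.zip y).reverse := by
  induction x generalizing y with
  | nil => simp
  | cons a x ih =>
      cases y with
      | nil => simp at h
      | cons b y =>
          simp only [List.length_cons, Nat.add_right_cancel_iff] at h
          rw [List.reverse_cons, List.reverse_cons, List.zip_append (by simp [h]), ih y h]
          simp

-- ===== VERDICT (by name: the statement is the Claim_ definition above) =====
theorem analyzeNewPair_spec : Claim_equal_analyzeNewPair := by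
  intro x y _ hpre
  unfold Spec_analyzeNewPair
  have hlen : x.toList.length = y.toList.length := hpre
  simp only [analyzeNewPair, analyzeNewPair_alt, pvRemoveTones_eq]
  rw [if_pos hlen, if_neg (by simp [hlen])]
  -- rewrite the loop body on in-range indices: the tonal values are always '0' and the two
  -- indexings collapse to a single indexing into the zipped list
  set zs := x.toList.zip y.toList with hzs
  have hzlen : zs.length = y.toList.length := by
    simp [hzs, List.length_zip, hlen]
  rw [PySem.List.foldl_congr_mem _ _
      (fun (s : Int × Int × List String) (i : Int) =>
        pvStep s (PySem.List.pyGetD zs i (' ', ' '))) _ ?_]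
  · rw [← hzlen]
    rw [PySem.List.foldl_pyRange_zero_pyGetD' zs (' ', ' ') pvStep ((0 : Int), (0 : Int), ([] : List String)),
        pvFold_zip zs 0 []]
    rw [pvZip_reverse x.toList y.toList hlen, pvFind?_eq_head?_filter, List.filter_reverse,
        List.head?_reverse, List.countP_eq_length_filter]
    simp only [hzs]
    simp
  · intro acc i hi
    rw [PySem.List.mem_pyRange_one] at hi
    obtain ⟨h0, h1⟩ := hi
    beta_reduce
    have hiy : i < (y.toList.length : Int) := h1
    have hix : i < (x.toList.length : Int) := by rw [hlen]; exact hiy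
    have hiz : i < (zs.length : Int) := by rw [hzlen]; exact hiy
    rw [PySem.List.pyGetD_eq_getElem _ _ h0 hix,
        PySem.List.pyGetD_eq_getElem _ _ h0 hiy,
        PySem.List.pyGetD_eq_getElem _ _ h0 (by simpa using hix),
        PySem.List.pyGetD_eq_getElem _ _ h0 (by simpa using hiy),
        PySem.List.pyGetD_eq_getElem _ _ h0 hiz]
    simp [pvStep, hzs, List.getElem_zip]
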